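-- pv_equiv track=rewrite | github.com/Zosmex/n-infinite-test | data-engineer-test/test_4.py | word_mesh
-- ===== SOURCE A (Python) =====
-- def word_mesh(words: list[str]) -> str:
--     # Write your code here.
--     result = ""
--
--     for i in range(len(words)-1):
--         word_1 = words[i]
--         word_2 = words[i+1]
--         overlap = ""
--
--         for j in range(1, min(len(word_1), len(word_2)) + 1):
--             if word_1[-j:] == word_2[:j]:
--                 overlap = word_1[-j:]
--
--         if overlap:
--             result += overlap
--         else:
--             return "failed to mesh"
--
--     return result
-- ===== SOURCE B (Python) =====
-- def word_mesh(words: list[str]) -> str: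
--     parts = []
--     for w1, w2 in zip(words, words[1:]):
--         # KMP prefix function on w2 + NUL + w1: the final border length is the
--         # longest suffix(w1)/prefix(w2) overlap (NUL occurs in neither word)
--         s = w2 + "\x00" + w1
--         pi = [0]
--         k = 0
--         for c in s[1:]:
--             while k and s[k] != c:
--                 k = pi[k - 1]
--             if s[k] == c:
--                 k += 1
--             pi.append(k)
--         if k == 0:
--             return "failed to mesh"
--         parts.append(w2[:k])
--     return "".join(parts)
-- ===== Notes on version B (the rewrite author's own statement) =====
-- stated objective: alternative
-- what changed: Replaces the per-pair brute-force scan over all overlap lengths (slice-compare for every j) by the KMP prefix function computed once on w2+NUL+w1, whose final border length is the longest suffix-prefix overlap; the result is assembled by joining per-pair pieces.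
import Mathlib
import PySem

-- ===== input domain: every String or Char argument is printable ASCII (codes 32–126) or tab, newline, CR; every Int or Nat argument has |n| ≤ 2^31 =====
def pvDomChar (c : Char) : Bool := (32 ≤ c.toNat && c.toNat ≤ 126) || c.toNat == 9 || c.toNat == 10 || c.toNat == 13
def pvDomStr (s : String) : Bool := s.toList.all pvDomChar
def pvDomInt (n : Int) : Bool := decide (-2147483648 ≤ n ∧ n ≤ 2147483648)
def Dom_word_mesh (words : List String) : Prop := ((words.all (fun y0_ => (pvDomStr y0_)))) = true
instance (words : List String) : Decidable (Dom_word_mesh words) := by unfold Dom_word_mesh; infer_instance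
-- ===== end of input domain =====

-- B replaces A's per-pair brute-force scan over all overlap lengths by a different
-- algorithm: the KMP prefix function on w2+NUL+w1, whose final border length is the
-- longest overlap; equal output proved on Dom (whose words are NUL-free).

-- ===== PORT A =====
-- inner loop: for j in range(1, min(len(w1),len(w2))+1): if w1[-j:] == w2[:j]: overlap = w1[-j:]
def overlapA (w1 w2 : List Char) : List Char :=
  (PySem.List.pyRange 1 ((min w1.length w2.length : Nat) + 1) 1).foldl
    (fun ov j =>
      if PySem.List.slice w1 (some (-j)) none = PySem.List.slice w2 none (some j)
      then PySem.List.slice w1 (some (-j)) none else ov) []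

-- outer loop: for i in range(len(words)-1), with the early return "failed to mesh"
def meshA (words : List (List Char)) (i : Nat) (result : List Char) : List Char :=
  if i < words.length - 1 then
    let w1 := words.getD i []
    let w2 := words.getD (i + 1) []
    let ov := overlapA w1 w2
    if ov ≠ [] then meshA words (i + 1) (result ++ ov)
    else "failed to mesh".toList
  else result
termination_by words.length - 1 - i

def word_mesh (words : List String) : String :=
  String.ofList (meshA (words.map (·.toList)) 0 [])

-- ===== PORT B =====
-- while k and s[k] != c: k = pi[k-1]   (fuel = k at the call site: k strictly decreases)
def fallB (s : List Char) (pi : List Nat) (c : Char) : Nat → Nat → Nat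
  | 0, k => k
  | fuel + 1, k =>
    if k ≠ 0 ∧ s.getD k ' ' ≠ c then fallB s pi c fuel (pi.getD (k - 1) 0) else k

-- loop body of `for c in s[1:]`: fall back, extend on match, pi.append(k)
def kmpStep (s : List Char) (st : List Nat × Nat) (c : Char) : List Nat × Nat :=
  let k1 := fallB s st.1 c st.2 st.2
  let k2 := if s.getD k1 ' ' = c then k1 + 1 else k1
  (st.1 ++ [k2], k2)

-- pi = [0]; k = 0; for c in s[1:]: … — returns the final k
def kmpK (s : List Char) : Nat := ((s.drop 1).foldl (kmpStep s) ([0], 0)).2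

-- for w1, w2 in zip(words, words[1:]): … parts.append(w2[:k]); early return on k == 0
def meshB : List (List Char × List Char) → List (List Char) → Option (List (List Char))
  | [], parts => some parts
  | (w1, w2) :: rest, parts =>
    let s := w2 ++ Char.ofNat 0 :: w1
    let k := kmpK s
    if k = 0 then none else meshB rest (parts ++ [w2.take k])

def word_mesh_alt (words : List String) : String :=
  let ws := words.map (·.toList)
  match meshB (ws.zip ws.tail) [] with
  | none => String.ofList "failed to mesh".toList
  | some parts => String.ofList (PySem.Chars.join [] parts)

-- ===== PRECONDITION & SPEC =====
def Spec_word_mesh (words : List String) (out : String) : Prop := out = word_mesh_alt words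
instance (words : List String) (out : String) : Decidable (Spec_word_mesh words out) := by unfold Spec_word_mesh; infer_instance

-- ===== CLAIM (what is proved, stated in full; the proofs are below) =====
def Claim_equal_word_mesh : Prop := ∀ (words : List String), Dom_word_mesh words → Spec_word_mesh words (word_mesh words)

-- ===== LEMMAS AND PROOFS =====
abbrev Qov (a b : List Char) (j : Nat) : Prop := 0 < j ∧ a.drop (a.length - j) = b.take j

def ovLen (a b : List Char) : Nat := Nat.findGreatest (Qov a b) (min a.length b.length)

theorem foldlA_eq (a b : List Char) (m : Nat) :
    (List.range m).foldl
      (fun ov (k : Nat) =>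
        if PySem.List.slice a (some (-(1 + (k : Int)))) none = PySem.List.slice b none (some (1 + (k : Int)))
        then PySem.List.slice a (some (-(1 + (k : Int)))) none else ov) []
      = b.take (Nat.findGreatest (Qov a b) m) := by
  induction m with
  | zero => simp [Nat.findGreatest_zero]
  | succ m ih =>
    rw [List.range_succ, List.foldl_append, ih, List.foldl_cons, List.foldl_nil,
        Nat.findGreatest_succ]
    have h1 : (1 + (m : Int)) = ((m + 1 : Nat) : Int) := by push_cast; ring
    have hs1 : PySem.List.slice a (some (-(1 + (m : Int)))) none = a.drop (a.length - (m + 1)) := by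
      rw [h1, PySem.List.slice_from_neg_natCast a (m + 1) (by omega)]
    have hs2 : PySem.List.slice b none (some (1 + (m : Int))) = b.take (m + 1) := by
      rw [h1, PySem.List.slice_to_natCast]
    rw [hs1, hs2]
    by_cases h : a.drop (a.length - (m + 1)) = b.take (m + 1)
    · have hq : Qov a b (m + 1) := ⟨Nat.succ_pos m, h⟩
      rw [if_pos h, if_pos hq, h]
    · have hq : ¬ Qov a b (m + 1) := fun hc => h hc.2
      rw [if_neg h, if_neg hq]

theorem overlapA_eq (a b : List Char) : overlapA a b = b.take (ovLen a b) := by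
  unfold overlapA ovLen
  rw [PySem.List.pyRange_one]
  have harg : (((min a.length b.length : Nat) : Int) + 1 - 1).toNat = min a.length b.length := by
    omega
  rw [harg, List.foldl_map]
  exact foldlA_eq a b (min a.length b.length)

abbrev BrdP (s : List Char) (i k : Nat) : Prop := k < i ∧ s.take k <:+ s.take i

def Fb (s : List Char) (i : Nat) : Nat := Nat.findGreatest (BrdP s i) (i - 1)

def piListF (s : List Char) (i : Nat) : List Nat := (List.range i).map (fun j => Fb s (j + 1))

theorem brd_zero (s : List Char) (i : Nat) (hi : 0 < i) : BrdP s i 0 :=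
  ⟨hi, by simp⟩

theorem Fb_lt (s : List Char) (i : Nat) (hi : 0 < i) : Fb s i < i :=
  lt_of_le_of_lt (Nat.findGreatest_le _) (by omega)

theorem brd_Fb (s : List Char) (i : Nat) (hi : 0 < i) : BrdP s i (Fb s i) :=
  Nat.findGreatest_spec (Nat.zero_le _) (brd_zero s i hi)

theorem le_Fb (s : List Char) (i j : Nat) (h : BrdP s i j) : j ≤ Fb s i :=
  Nat.le_findGreatest (by have := h.1; omega) h

theorem suffix_mono (s : List Char) (i j k : Nat) (hk : s.take k <:+ s.take i)
    (hj : s.take j <:+ s.take i) (hjk : j ≤ k) : s.take j <:+ s.take k :=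
  List.suffix_of_suffix_length_le hj hk (by simp; omega)

theorem ext_iff (s : List Char) (i j : Nat) (hj : j < s.length) (hi : i < s.length) :
    (s.take (j + 1) <:+ s.take (i + 1)) ↔
      (s.take j <:+ s.take i) ∧ s.getD j ' ' = s.getD i ' ' := by
  rw [List.take_add_one, List.take_add_one,
      List.getElem?_eq_getElem hj, List.getElem?_eq_getElem hi,
      List.getD_eq_getElem s ' ' hj, List.getD_eq_getElem s ' ' hi]
  rw [← List.reverse_prefix]
  simp only [List.reverse_append, Option.toList_some, List.reverse_cons, List.reverse_nil,
    List.nil_append, List.cons_append, List.cons_prefix_cons]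
  rw [List.reverse_prefix]
  tauto

theorem Fsucc_eq_succ (s : List Char) (i : Nat) (hin : i < s.length) (j : Nat)
    (hji : j < i) (hsuf : s.take j <:+ s.take i) (hc : s.getD j ' ' = s.getD i ' ')
    (hmax : ∀ j', j' < i → s.take j' <:+ s.take i → s.getD j' ' ' = s.getD i ' ' → j' ≤ j) :
    Fb s (i + 1) = j + 1 := by
  unfold Fb
  rw [Nat.findGreatest_eq_iff]
  refine ⟨by omega, fun _ => ⟨by omega, (ext_iff s i j (by omega) hin).mpr ⟨hsuf, hc⟩⟩, ?_⟩
  intro n hlt hle hB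
  obtain ⟨n', rfl⟩ : ∃ n', n = n' + 1 := ⟨n - 1, by omega⟩
  have h2 := (ext_iff s i n' (by omega) hin).mp hB.2
  have := hmax n' (by omega) h2.1 h2.2
  omega

theorem Fsucc_eq_zero (s : List Char) (i : Nat) (hin : i < s.length)
    (hnone : ∀ j, j < i → s.take j <:+ s.take i → s.getD j ' ' ≠ s.getD i ' ') :
    Fb s (i + 1) = 0 := by
  unfold Fb
  rw [Nat.findGreatest_eq_iff]
  refine ⟨by omega, fun h => absurd rfl h, ?_⟩
  intro n hlt hle hB
  obtain ⟨n', rfl⟩ : ∃ n', n = n' + 1 := ⟨n - 1, by omega⟩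
  have h2 := (ext_iff s i n' (by omega) hin).mp hB.2
  exact hnone n' (by omega) h2.1 h2.2

theorem piListF_getD (s : List Char) (i k : Nat) (hk1 : 1 ≤ k) (hk : k ≤ i) :
    (piListF s i).getD (k - 1) 0 = Fb s k := by
  unfold piListF
  rw [List.getD_eq_getElem _ 0 (by simp; omega)]
  simp only [List.getElem_map, List.getElem_range]
  congr 1
  omega

theorem fallB_stop (s : List Char) (pi : List Nat) (c : Char) (fuel k : Nat)
    (h : s.getD k ' ' = c) : fallB s pi c fuel k = k := by
  cases fuel with
  | zero => rfl
  | succ f => rw [fallB, if_neg (fun hh => hh.2 h)]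

theorem fallB_zero (s : List Char) (pi : List Nat) (c : Char) (fuel : Nat) :
    fallB s pi c fuel 0 = 0 := by
  cases fuel <;> simp [fallB]

theorem step_eq (s : List Char) (i : Nat) (hi1 : 1 ≤ i) (hin : i < s.length) (c : Char)
    (hc : c = s.getD i ' ') :
    ∀ k fuel, k ≤ fuel → (s.take k <:+ s.take i) → k < i →
      (∀ j, j < i → s.take j <:+ s.take i → s.getD j ' ' = c → j ≤ k) →
      (if s.getD (fallB s (piListF s i) c fuel k) ' ' = c
       then fallB s (piListF s i) c fuel k + 1
       else fallB s (piListF s i) c fuel k) = Fb s (i + 1) := by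
  intro k
  induction k using Nat.strong_induction_on with
  | _ k IH =>
    intro fuel hfuel hsuf hki hmax
    by_cases hm : s.getD k ' ' = c
    · rw [fallB_stop s _ c fuel k hm, if_pos hm]
      exact (Fsucc_eq_succ s i hin k hki hsuf (hm.trans hc) (by
        intro j' h1 h2 h3
        exact hmax j' h1 h2 (h3.trans hc.symm))).symm
    · by_cases hk0 : k = 0
      · subst hk0
        rw [fallB_zero, if_neg hm]
        refine (Fsucc_eq_zero s i hin ?_).symm
        intro j hj hjs hjc
        have hj0 : j ≤ 0 := hmax j hj hjs (hjc.trans hc.symm)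
        have hj' : j = 0 := by omega
        subst hj'
        exact hm (hjc.trans hc.symm)
      · obtain ⟨f, rfl⟩ : ∃ f, fuel = f + 1 := ⟨fuel - 1, by omega⟩
        have hstep : fallB s (piListF s i) c (f + 1) k = fallB s (piListF s i) c f (Fb s k) := by
          rw [fallB]
          rw [if_pos ⟨hk0, hm⟩, piListF_getD s i k (by omega) (by omega)]
        rw [hstep]
        have hFlt : Fb s k < k := Fb_lt s k (by omega)
        have hbf := brd_Fb s k (by omega)
        refine IH (Fb s k) hFlt f (by omega) (hbf.2.trans ?_ ) (by omega) ?_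
        · exact hsuf
        · intro j hj hjs hjc
          have hjk : j ≤ k := hmax j hj hjs hjc
          have hjne : j ≠ k := by
            intro h; rw [h] at hjc; exact hm hjc
          exact le_Fb s k j ⟨by omega, suffix_mono s i j k hsuf hjs (by omega)⟩

theorem kmpStep_eq (s : List Char) (i : Nat) (h1 : 1 ≤ i) (hin : i < s.length) :
    kmpStep s (piListF s i, Fb s i) s[i] = (piListF s (i + 1), Fb s (i + 1)) := by
  have hc : (s[i] : Char) = s.getD i ' ' := (List.getD_eq_getElem s ' ' hin).symm
  have hK := step_eq s i h1 hin s[i] hc (Fb s i) (Fb s i) le_rfl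
    (brd_Fb s i (by omega)).2 (Fb_lt s i (by omega))
    (fun j hj hjs hjc => le_Fb s i j ⟨hj, hjs⟩)
  unfold kmpStep
  simp only []
  rw [hK]
  congr 1
  unfold piListF
  rw [List.range_succ, List.map_append]
  rfl

theorem kmp_loop (s : List Char) :
    ∀ d i, 1 ≤ i → i ≤ s.length → s.length - i = d →
      (s.drop i).foldl (kmpStep s) (piListF s i, Fb s i)
        = (piListF s s.length, Fb s s.length) := by
  intro d
  induction d with
  | zero =>
    intro i h1 h2 h3
    have hi : i = s.length := by omega
    subst hi
    simp
  | succ d IH =>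
    intro i h1 h2 h3
    have hin : i < s.length := by omega
    rw [List.drop_eq_getElem_cons hin, List.foldl_cons, kmpStep_eq s i h1 hin]
    exact IH (i + 1) (by omega) (by omega) (by omega)

theorem kmpK_eq (s : List Char) (hs : s ≠ []) : kmpK s = Fb s s.length := by
  have hlen : 1 ≤ s.length := List.length_pos_iff.mpr hs
  have h0 : piListF s 1 = [0] := by
    unfold piListF Fb
    simp [Nat.findGreatest_zero]
  have h1 : Fb s 1 = 0 := by unfold Fb; simp [Nat.findGreatest_zero]
  unfold kmpK
  have := kmp_loop s (s.length - 1) 1 le_rfl hlen rfl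
  rw [h0, h1] at this
  rw [this]

theorem mesh_s_length (a b : List Char) :
    (b ++ Char.ofNat 0 :: a).length = b.length + 1 + a.length := by
  simp; omega

theorem brd_to_match (a b : List Char) (ha : Char.ofNat 0 ∉ a) (hb : Char.ofNat 0 ∉ b)
    (k : Nat) (h : BrdP (b ++ Char.ofNat 0 :: a) (b ++ Char.ofNat 0 :: a).length k) :
    k ≤ min a.length b.length ∧ a.drop (a.length - k) = b.take k := by
  set s := b ++ Char.ofNat 0 :: a with hsdef
  have hn : s.length = b.length + 1 + a.length := mesh_s_length a b
  obtain ⟨hk, hsuf⟩ := h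
  rw [List.take_length] at hsuf
  have hlen : (s.take k).length = k := by simp; omega
  have hdrop : s.take k = s.drop (s.length - k) := by
    have := List.suffix_iff_eq_drop.mp hsuf
    rwa [hlen] at this
  have hsep : s[b.length]? = some (Char.ofNat 0) := by
    rw [hsdef, List.getElem?_append_right (le_refl b.length)]
    simp
  have helt : ∀ j, j < k → s[j]? = s[s.length - k + j]? := by
    intro j hj
    rw [← List.getElem?_take_of_lt (l := s) hj, hdrop, List.getElem?_drop]
  have hkb : k ≤ b.length := by
    by_contra hgt
    push_neg at hgt
    have h1 := helt b.length hgt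
    rw [hsep] at h1
    have h2 : s[s.length - k + b.length]? = a[s.length - k - 1]? := by
      rw [hsdef, List.getElem?_append_right (by omega)]
      have he : s.length - k + b.length - b.length = (s.length - k - 1) + 1 := by omega
      rw [he, List.getElem?_cons_succ]
    rw [h2] at h1
    exact ha (List.mem_of_getElem? h1.symm)
  have hka : k ≤ a.length := by
    by_contra hgt
    push_neg at hgt
    have h1 := helt (k - a.length - 1) (by omega)
    have hidx : s.length - k + (k - a.length - 1) = b.length := by omega
    rw [hidx, hsep] at h1
    have h2 : s[k - a.length - 1]? = b[k - a.length - 1]? := by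
      rw [hsdef, List.getElem?_append_left (by omega)]
    rw [h2] at h1
    exact hb (List.mem_of_getElem? h1)
  refine ⟨by omega, ?_⟩
  have htk : s.take k = b.take k := by
    rw [hsdef]
    exact List.take_append_of_le_length hkb
  have hdk : s.drop (s.length - k) = a.drop (a.length - k) := by
    rw [hsdef, List.drop_append]
    rw [List.drop_eq_nil_of_le (by simp; omega), List.nil_append]
    have he : (b ++ Char.ofNat 0 :: a).length - k - b.length = (a.length - k) + 1 := by
      simp; omega
    rw [he, List.drop_succ_cons]
  rw [← htk, ← hdk, hdrop]

theorem brd_of_match (a b : List Char) (k : Nat) (hk : k ≤ min a.length b.length)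
    (hm : a.drop (a.length - k) = b.take k) (hpos : 0 < k) :
    BrdP (b ++ Char.ofNat 0 :: a) (b ++ Char.ofNat 0 :: a).length k := by
  set s := b ++ Char.ofNat 0 :: a with hsdef
  have hn : s.length = b.length + 1 + a.length := mesh_s_length a b
  refine ⟨by omega, ?_⟩
  rw [List.take_length]
  rw [List.suffix_iff_eq_drop]
  have hlen : (s.take k).length = k := by simp; omega
  rw [hlen]
  have htk : s.take k = b.take k := by
    rw [hsdef]; exact List.take_append_of_le_length (by omega)
  have hdk : s.drop (s.length - k) = a.drop (a.length - k) := by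
    rw [hsdef, List.drop_append]
    rw [List.drop_eq_nil_of_le (by simp; omega), List.nil_append]
    have he : (b ++ Char.ofNat 0 :: a).length - k - b.length = (a.length - k) + 1 := by
      simp; omega
    rw [he, List.drop_succ_cons]
  rw [htk, hdk, ← hm]

theorem Fb_eq_ovLen (a b : List Char) (ha : Char.ofNat 0 ∉ a) (hb : Char.ofNat 0 ∉ b) :
    Fb (b ++ Char.ofNat 0 :: a) (b ++ Char.ofNat 0 :: a).length = ovLen a b := by
  set s := b ++ Char.ofNat 0 :: a with hsdef
  have hn : s.length = b.length + 1 + a.length := mesh_s_length a b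
  apply Nat.le_antisymm
  · rcases Nat.eq_zero_or_pos (Fb s s.length) with h0 | hpos
    · omega
    · have hB : BrdP s s.length (Fb s s.length) := brd_Fb s s.length (by omega)
      obtain ⟨hle, hmatch⟩ := brd_to_match a b ha hb _ hB
      exact Nat.le_findGreatest hle ⟨hpos, hmatch⟩
  · rcases Nat.eq_zero_or_pos (ovLen a b) with h0 | hpos
    · omega
    · have hq : Qov a b (ovLen a b) :=
        (Nat.findGreatest_eq_iff.mp (rfl : ovLen a b = ovLen a b)).2.1 (by omega)
      have hle : ovLen a b ≤ min a.length b.length := Nat.findGreatest_le _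
      exact le_Fb s s.length _ (brd_of_match a b _ hle hq.2 hq.1)

theorem overlap_pair (w1 w2 : List Char) (h1 : Char.ofNat 0 ∉ w1) (h2 : Char.ofNat 0 ∉ w2) :
    overlapA w1 w2 = w2.take (kmpK (w2 ++ Char.ofNat 0 :: w1)) := by
  rw [overlapA_eq, kmpK_eq _ (by simp), Fb_eq_ovLen w1 w2 h1 h2]

theorem kmpK_le (w1 w2 : List Char) (h1 : Char.ofNat 0 ∉ w1) (h2 : Char.ofNat 0 ∉ w2) :
    kmpK (w2 ++ Char.ofNat 0 :: w1) ≤ min w1.length w2.length := by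
  rw [kmpK_eq _ (by simp), Fb_eq_ovLen w1 w2 h1 h2]
  exact Nat.findGreatest_le _

theorem joinNilCons (x : List Char) (ps : List (List Char)) :
    PySem.Chars.join [] (x :: ps) = x ++ PySem.Chars.join [] ps := by
  cases ps with
  | nil => rw [PySem.Chars.join_singleton, PySem.Chars.join_nil, List.append_nil]
  | cons y ys => rw [PySem.Chars.join_cons_cons]; simp

theorem meshB_acc (pairs : List (List Char × List Char)) (parts : List (List Char)) :
    meshB pairs parts = (meshB pairs []).map (fun ps => parts ++ ps) := by
  induction pairs generalizing parts with
  | nil => simp [meshB]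
  | cons p rest IH =>
    obtain ⟨w1, w2⟩ := p
    rw [meshB, meshB]
    by_cases hk : kmpK (w2 ++ Char.ofNat 0 :: w1) = 0
    · simp [hk]
    · rw [if_neg hk, if_neg hk, IH (parts ++ [w2.take _]), IH ([] ++ [w2.take _])]
      cases meshB rest [] <;> simp

-- proof-side structural form of A's outer loop
def meshH : List (List Char) → List Char → List Char
  | [], res => res
  | [_], res => res
  | w1 :: w2 :: r, res =>
    if overlapA w1 w2 ≠ [] then meshH (w2 :: r) (res ++ overlapA w1 w2)
    else "failed to mesh".toList

theorem meshA_eq_H (ws : List (List Char)) :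
    ∀ d i res, ws.length - i = d → meshA ws i res = meshH (ws.drop i) res := by
  intro d
  induction d with
  | zero =>
    intro i res hd
    rw [meshA]
    rw [if_neg (by omega)]
    rw [List.drop_eq_nil_of_le (by omega)]
    rfl
  | succ d IH =>
    intro i res hd
    by_cases hlt : i < ws.length - 1
    · have hi1 : i < ws.length := by omega
      have hi2 : i + 1 < ws.length := by omega
      rw [meshA, if_pos hlt]
      simp only [List.getD_eq_getElem ws [] hi1, List.getD_eq_getElem ws [] hi2]
      rw [List.drop_eq_getElem_cons hi1, List.drop_eq_getElem_cons hi2]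
      rw [meshH]
      by_cases hov : overlapA ws[i] ws[i + 1] ≠ []
      · rw [if_pos hov, if_pos hov, IH (i + 1) _ (by omega), List.drop_eq_getElem_cons hi2]
      · rw [if_neg hov, if_neg hov]
    · rw [meshA, if_neg hlt]
      rcases hl : ws.drop i with _ | ⟨x, _ | ⟨y, r⟩⟩
      · rfl
      · rfl
      · exfalso
        have := congrArg List.length hl
        simp at this
        omega

theorem meshH_eq_B (xs : List (List Char)) :
    ∀ res, (∀ w ∈ xs, Char.ofNat 0 ∉ w) →
      meshH xs res = (match meshB (xs.zip xs.tail) [] with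
        | none => "failed to mesh".toList
        | some ps => res ++ PySem.Chars.join [] ps) := by
  induction xs with
  | nil => intro res _; simp [meshH, meshB, PySem.Chars.join_nil]
  | cons w1 t IH =>
    intro res hnf
    cases t with
    | nil => simp [meshH, meshB, PySem.Chars.join_nil]
    | cons w2 r =>
      have h1 : Char.ofNat 0 ∉ w1 := hnf w1 (by simp)
      have h2 : Char.ofNat 0 ∉ w2 := hnf w2 (by simp)
      have hov : overlapA w1 w2 = w2.take (kmpK (w2 ++ Char.ofNat 0 :: w1)) :=
        overlap_pair w1 w2 h1 h2
      have hle := kmpK_le w1 w2 h1 h2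
      rw [meshH]
      have hzip : (w1 :: w2 :: r).zip (w1 :: w2 :: r).tail
          = (w1, w2) :: ((w2 :: r).zip ((w2 :: r).tail)) := rfl
      rw [hzip, meshB]
      by_cases hk : kmpK (w2 ++ Char.ofNat 0 :: w1) = 0
      · rw [if_pos hk]
        rw [if_neg (by simp [hov, hk])]
      · rw [if_neg hk]
        have hovne : overlapA w1 w2 ≠ [] := by
          rw [hov]
          apply List.ne_nil_of_length_pos
          rw [List.length_take]
          omega
        rw [if_pos hovne]
        rw [IH (res ++ overlapA w1 w2) (fun w hw => hnf w (by simp [hw]))]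
        rw [meshB_acc _ ([] ++ [w2.take _])]
        cases hm : meshB ((w2 :: r).zip ((w2 :: r).tail)) [] with
        | none => simp
        | some ps =>
          simp only [Option.map_some, List.nil_append, List.singleton_append]
          rw [joinNilCons, hov]
          simp [List.append_assoc]

theorem dom_nulfree (words : List String) (h : Dom_word_mesh words) :
    ∀ w ∈ words.map (·.toList), Char.ofNat 0 ∉ w := by
  intro w hw hc
  unfold Dom_word_mesh at h
  rw [List.all_eq_true] at h
  obtain ⟨t, ht, rfl⟩ := List.mem_map.mp hw
  have := h t ht
  unfold pvDomStr at this
  rw [List.all_eq_true] at this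
  have hch := this _ hc
  simp [pvDomChar] at hch

-- ===== VERDICT (by name: the statement is the Claim_ definition above) =====
theorem word_mesh_spec : Claim_equal_word_mesh := by
  intro words hdom
  unfold Spec_word_mesh word_mesh word_mesh_alt
  simp only []
  rw [meshA_eq_H _ ((words.map (·.toList)).length - 0) 0 [] rfl, List.drop_zero]
  rw [meshH_eq_B _ [] (dom_nulfree words hdom)]
  cases meshB (((words.map (·.toList))).zip ((words.map (·.toList))).tail) [] with
  | none => rfl
  | some ps => simp
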